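-- pv_equiv track=rewrite | github.com/raa2015/ctf-write-ups | DiceCTF 2026/dicewallet/local_one_shot/run_local_one_shot.py | summarize_oracle_tail
-- ===== SOURCE A (Python) =====
-- def summarize_oracle_tail(text: str) -> str:
--     lines = [line.strip() for line in text.splitlines() if line.strip()]
--     if not lines:
--         return "no oracle traffic captured"
--     if all(line == "listening" for line in lines):
--         return "no oracle traffic captured"
--     interesting = [line for line in lines if " sni " in line or " connect " in line]
--     if interesting:
--         return interesting[-1]
--     return lines[-1]
-- ===== SOURCE B (Python) =====
-- def summarize_oracle_tail(text: str) -> str: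
--     last_nonempty = None
--     last_interesting = None
--     all_listening = True
--     for line in text.splitlines():
--         s = line.strip()
--         if not s:
--             continue
--         last_nonempty = s
--         if " sni " in s or " connect " in s:
--             last_interesting = s
--         all_listening = all_listening and s == "listening"
--     if last_nonempty is None or all_listening:
--         return "no oracle traffic captured"
--     if last_interesting is not None:
--         return last_interesting
--     return last_nonempty
-- ===== Notes on version B (the rewrite author's own statement) =====
-- stated objective: alternative
-- what changed: B replaces A's three separate comprehensions/scans (build cleaned list, all-listening check, interesting filter) by a single fold over the raw lines maintaining (last nonempty, last interesting, all-listening) state, with one final dispatch.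
import Mathlib
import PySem

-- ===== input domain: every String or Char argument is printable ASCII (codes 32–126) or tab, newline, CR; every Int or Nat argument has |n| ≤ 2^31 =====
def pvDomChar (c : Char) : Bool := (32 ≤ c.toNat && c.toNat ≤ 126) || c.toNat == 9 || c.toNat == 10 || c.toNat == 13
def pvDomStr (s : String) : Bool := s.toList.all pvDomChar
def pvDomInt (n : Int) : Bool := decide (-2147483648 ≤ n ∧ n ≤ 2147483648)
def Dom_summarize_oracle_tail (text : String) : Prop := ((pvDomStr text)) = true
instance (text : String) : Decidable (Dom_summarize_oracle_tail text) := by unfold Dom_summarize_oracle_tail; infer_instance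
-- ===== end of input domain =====

-- B replaces A's three list comprehensions / scans by one fold over the raw lines
-- maintaining (last nonempty, last interesting, all-listening); same return value, one pass.

-- ===== PORT A =====
def summarize_oracle_tail (text : String) : String :=
  let lines := ((PySem.Str.splitlines text).map PySem.Str.strip).filter (fun l => l ≠ "")
  if lines = [] then "no oracle traffic captured"
  else if lines.all (fun l => l == "listening") then "no oracle traffic captured"
  else
    let interesting := lines.filter
      (fun l => PySem.Str.isIn " sni " l || PySem.Str.isIn " connect " l)
    if interesting ≠ [] then
      (interesting.getLast?).getD ""   -- interesting[-1]; the branch guarantees nonempty, so exact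
    else
      (lines.getLast?).getD ""         -- lines[-1]; nonempty by the first branch, so exact

-- ===== PORT B =====
def pvSummStep (st : Option String × Option String × Bool) (line : String) :
    Option String × Option String × Bool :=
  let s := PySem.Str.strip line
  if s = "" then st
  else
    (some s,
     if PySem.Str.isIn " sni " s || PySem.Str.isIn " connect " s then some s else st.2.1,
     st.2.2 && (s == "listening"))

def summarize_oracle_tail_alt (text : String) : String :=
  match (PySem.Str.splitlines text).foldl pvSummStep (none, none, true) with
  | (none, _, _) => "no oracle traffic captured"
  | (some ln, li, al) =>
    if al then "no oracle traffic captured"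
    else match li with
      | some x => x
      | none => ln

-- ===== PRECONDITION & SPEC =====
def Spec_summarize_oracle_tail (text : String) (out : String) : Prop := out = summarize_oracle_tail_alt text
instance (text : String) (out : String) : Decidable (Spec_summarize_oracle_tail text out) := by unfold Spec_summarize_oracle_tail; infer_instance

-- ===== CLAIM (what is proved, stated in full; the proofs are below) =====
def Claim_equal_summarize_oracle_tail : Prop := ∀ (text : String), Dom_summarize_oracle_tail text → Spec_summarize_oracle_tail text (summarize_oracle_tail text)

-- ===== LEMMAS AND PROOFS =====

-- A's cleaned list of lines, as a function of the raw line list.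
def pvLines (ls : List String) : List String :=
  (ls.map PySem.Str.strip).filter (fun l => l ≠ "")

def pvInterest (l : String) : Bool :=
  PySem.Str.isIn " sni " l || PySem.Str.isIn " connect " l

-- A's post-splitlines computation, abstracted over the cleaned list.
def pvA (L : List String) : String :=
  if L = [] then "no oracle traffic captured"
  else if L.all (fun l => l == "listening") then "no oracle traffic captured"
  else if L.filter pvInterest ≠ [] then ((L.filter pvInterest).getLast?).getD ""
  else (L.getLast?).getD ""

-- B's final dispatch, abstracted over the fold state.
def pvB (st : Option String × Option String × Bool) : String :=
  match st.1 with
  | none => "no oracle traffic captured"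
  | some ln => if st.2.2 then "no oracle traffic captured" else (st.2.1).getD ln

theorem pvA_eq (text : String) :
    summarize_oracle_tail text = pvA (pvLines (PySem.Str.splitlines text)) := rfl

theorem pvB_eq (text : String) :
    summarize_oracle_tail_alt text =
      pvB ((PySem.Str.splitlines text).foldl pvSummStep (none, none, true)) := by
  unfold summarize_oracle_tail_alt pvB
  cases (PySem.Str.splitlines text).foldl pvSummStep (none, none, true) with
  | mk a bc =>
    cases bc with
    | mk b c => cases a <;> cases b <;> rfl

-- Invariant of B's fold: it computes the last nonempty line, the last interesting
-- line and the all-listening flag of A's cleaned list, threaded through the state.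
theorem pvSummStep_foldl (ls : List String) (a b : Option String) (c : Bool) :
    ls.foldl pvSummStep (a, b, c) =
      (((pvLines ls).getLast?).or a,
       (((pvLines ls).filter pvInterest).getLast?).or b,
       c && (pvLines ls).all (fun l => l == "listening")) := by
  induction ls generalizing a b c with
  | nil => simp [pvLines]
  | cons h t ih =>
    rw [List.foldl_cons]
    by_cases hs : PySem.Str.strip h = ""
    · have hL : pvLines (h :: t) = pvLines t := by simp [pvLines, hs]
      have hst : pvSummStep (a, b, c) h = (a, b, c) := by
        simp [pvSummStep, hs]
      rw [hst, hL, ih]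
    · have hL : pvLines (h :: t) = PySem.Str.strip h :: pvLines t := by
        simp [pvLines, hs]
      have hst : pvSummStep (a, b, c) h =
          (some (PySem.Str.strip h),
           if pvInterest (PySem.Str.strip h) then some (PySem.Str.strip h) else b,
           c && (PySem.Str.strip h == "listening")) := by
        simp [pvSummStep, pvInterest, hs]
      rw [hst, ih, hL]
      have e1 : (pvLines t).getLast?.or (some (PySem.Str.strip h)) =
          (PySem.Str.strip h :: pvLines t).getLast?.or a := by
        rw [List.getLast?_cons]
        cases (pvLines t).getLast? <;> rfl
      have e2 : ((pvLines t).filter pvInterest).getLast?.or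
            (if pvInterest (PySem.Str.strip h) then some (PySem.Str.strip h) else b) =
          ((PySem.Str.strip h :: pvLines t).filter pvInterest).getLast?.or b := by
        rw [List.filter_cons]
        by_cases hi : pvInterest (PySem.Str.strip h)
        · rw [if_pos hi, if_pos hi, List.getLast?_cons]
          cases ((pvLines t).filter pvInterest).getLast? <;> rfl
        · rw [if_neg hi, if_neg hi]
      have e3 : ((c && (PySem.Str.strip h == "listening")) &&
            (pvLines t).all (fun l => l == "listening")) =
          (c && (PySem.Str.strip h :: pvLines t).all (fun l => l == "listening")) := by
        rw [List.all_cons, Bool.and_assoc]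
      rw [e1, e2, e3]

theorem pvA_eq_pvB (L : List String) :
    pvA L = pvB (L.getLast?, (L.filter pvInterest).getLast?, L.all (fun l => l == "listening")) := by
  by_cases hnil : L = []
  · subst hnil; rfl
  · obtain ⟨x, hx⟩ : ∃ x, L.getLast? = some x :=
      ⟨L.getLast hnil, List.getLast?_eq_some_getLast hnil⟩
    unfold pvA pvB
    rw [hx, if_neg hnil]
    by_cases hall : L.all (fun l => l == "listening")
    · simp [hall]
    · simp only [hall, Bool.false_eq_true, if_false]
      by_cases hint : L.filter pvInterest = []
      · rw [if_neg (by simp [hint]), hint]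
        simp
      · obtain ⟨y, hy⟩ : ∃ y, (L.filter pvInterest).getLast? = some y :=
          ⟨_, List.getLast?_eq_some_getLast hint⟩
        rw [if_pos (by simp [hint]), hy]
        rfl

-- ===== VERDICT (by name: the statement is the Claim_ definition above) =====
theorem summarize_oracle_tail_spec : Claim_equal_summarize_oracle_tail := by
  intro text _
  unfold Spec_summarize_oracle_tail
  rw [pvA_eq, pvB_eq, pvSummStep_foldl, Option.or_none, Option.or_none, Bool.true_and,
    pvA_eq_pvB]
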